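-- pv_equiv track=rewrite | github.com/schemes-ohyeah/tcs-overwatch-elo | main.py | find_map_data
-- ===== SOURCE A (Python) =====
-- def find_map_data(map_results):
--     NAME = 1
--     RESULT = 0
--     data = {}
--     for result in map_results:
--         if result[NAME] not in data:
--             data[result[NAME]] = {
--                 "win" : 0,
--                 "lose" : 0
--             }
--         if result[RESULT] == 1:
--             data[result[NAME]]["win"] += 1
--         elif result[RESULT] == -1:
--             data[result[NAME]]["lose"] += 1
--         else:
--             # Draws do not appear to be recorded by Tespa, they will
--             # play a tie breaker and winner of that map will be recorded
--             # as the winner for the original map, tie breaker map is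
--             # not recorded
--             pass
--     return data
-- ===== SOURCE B (Python) =====
-- def find_map_data(map_results):
--     # Partition first: bucket the result codes per map name, then reduce
--     # each bucket to its win/lose counts in a second pass.
--     groups = {}
--     for result, name in map_results:
--         groups.setdefault(name, []).append(result)
--     return {name: {"win": codes.count(1), "lose": codes.count(-1)}
--             for name, codes in groups.items()}
-- ===== Notes on version B (the rewrite author's own statement) =====
-- stated objective: alternative
-- what changed: Replaces the single interleaved count-as-you-go loop over a nested dict with a partition-then-reduce shape: one pass groups result codes per map name, a second pass turns each bucket into its win/lose counts via list.count.
import Mathlib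
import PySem

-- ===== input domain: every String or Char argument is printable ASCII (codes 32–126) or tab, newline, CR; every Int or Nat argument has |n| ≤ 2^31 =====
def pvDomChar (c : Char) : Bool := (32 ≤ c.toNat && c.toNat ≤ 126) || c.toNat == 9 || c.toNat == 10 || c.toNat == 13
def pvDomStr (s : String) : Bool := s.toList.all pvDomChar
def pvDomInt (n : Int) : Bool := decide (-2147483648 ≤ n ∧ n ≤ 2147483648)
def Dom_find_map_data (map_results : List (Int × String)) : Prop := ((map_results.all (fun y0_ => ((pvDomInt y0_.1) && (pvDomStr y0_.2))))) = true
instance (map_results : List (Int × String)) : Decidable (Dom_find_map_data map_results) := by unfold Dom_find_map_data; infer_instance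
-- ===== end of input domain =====

-- B replaces A's interleaved per-row counting over a nested dict by a
-- partition-then-reduce decomposition: group the result codes per name, then count.

-- ===== PORT A =====
-- one step of A's loop body: ensure the entry exists, then bump win/lose
def pvStepA (d : PySem.Dict String (PySem.Dict String Int)) (result : Int × String) :
    PySem.Dict String (PySem.Dict String Int) :=
  let d := if d.contains result.2 then d
           else d.insert result.2 (PySem.Dict.ofList [("win", (0 : Int)), ("lose", (0 : Int))])
  if result.1 == 1 then
    d.modify result.2 PySem.Dict.empty (fun m => m.modify "win" 0 (· + 1))
  else if result.1 == -1 then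
    d.modify result.2 PySem.Dict.empty (fun m => m.modify "lose" 0 (· + 1))
  else d

def find_map_data (map_results : List (Int × String)) : List (String × List (String × Int)) :=
  ((map_results.foldl pvStepA PySem.Dict.empty).items.map (fun p => (p.1, p.2.items)))

-- ===== PORT B =====
def find_map_data_alt (map_results : List (Int × String)) : List (String × List (String × Int)) :=
  (map_results.foldl
    (fun g p => g.modify p.2 [] (fun l => l ++ [p.1]))
    (PySem.Dict.empty : PySem.Dict String (List Int))).items.map
      (fun p => (p.1, [("win", (p.2.count 1 : Int)), ("lose", (p.2.count (-1) : Int))]))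

-- ===== PRECONDITION & SPEC =====
def Spec_find_map_data (map_results : List (Int × String)) (out : List (String × List (String × Int))) : Prop := out = find_map_data_alt map_results
instance (map_results : List (Int × String)) (out : List (String × List (String × Int))) : Decidable (Spec_find_map_data map_results out) := by unfold Spec_find_map_data; infer_instance

-- ===== CLAIM (what is proved, stated in full; the proofs are below) =====
def Claim_equal_find_map_data : Prop := ∀ (map_results : List (Int × String)), Dom_find_map_data map_results → Spec_find_map_data map_results (find_map_data map_results)

-- ===== LEMMAS AND PROOFS =====

-- the per-code update A performs on the inner win/lose dict
def pvInnerUpd (m : PySem.Dict String Int) (r : Int) : PySem.Dict String Int :=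
  if r == 1 then m.modify "win" 0 (· + 1)
  else if r == -1 then m.modify "lose" 0 (· + 1)
  else m

theorem pvInner0_eq : PySem.Dict.ofList [("win", (0 : Int)), ("lose", (0 : Int))]
    = PySem.Dict.mk [("win", (0 : Int)), ("lose", (0 : Int))] := by decide

theorem pvModify_win (w l : Int) :
    (PySem.Dict.mk [("win", w), ("lose", l)]).modify "win" 0 (· + 1)
      = PySem.Dict.mk [("win", w + 1), ("lose", l)] := by
  simp [PySem.Dict.modify, PySem.Dict.insert, PySem.Dict.getD, PySem.Dict.get?, PySem.Dict.contains]

theorem pvModify_lose (w l : Int) :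
    (PySem.Dict.mk [("win", w), ("lose", l)]).modify "lose" 0 (· + 1)
      = PySem.Dict.mk [("win", w), ("lose", l + 1)] := by
  simp [PySem.Dict.modify, PySem.Dict.insert, PySem.Dict.getD, PySem.Dict.get?, PySem.Dict.contains]

theorem pvInner_foldl (codes : List Int) : ∀ (w l : Int),
    codes.foldl pvInnerUpd (PySem.Dict.mk [("win", w), ("lose", l)])
      = PySem.Dict.mk [("win", w + (codes.count 1 : Int)), ("lose", l + (codes.count (-1) : Int))] := by
  induction codes with
  | nil => intro w l; simp
  | cons r cs ih =>
    intro w l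
    rw [List.foldl_cons]
    by_cases h1 : r = 1
    · subst h1
      have hstep : pvInnerUpd (PySem.Dict.mk [("win", w), ("lose", l)]) 1
          = PySem.Dict.mk [("win", w + 1), ("lose", l)] := by
        simp [pvInnerUpd, pvModify_win]
      have c1 : (((1 : Int) :: cs).count 1 : Int) = (cs.count 1 : Int) + 1 := by
        simp [List.count_cons]
      have c2 : (((1 : Int) :: cs).count (-1) : Int) = (cs.count (-1) : Int) := by
        simp [List.count_cons]
      have e1 : w + 1 + (cs.count 1 : Int) = w + ((cs.count 1 : Int) + 1) := by ring
      rw [hstep, ih, c1, c2, e1]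
    · by_cases h2 : r = -1
      · subst h2
        have hstep : pvInnerUpd (PySem.Dict.mk [("win", w), ("lose", l)]) (-1)
            = PySem.Dict.mk [("win", w), ("lose", l + 1)] := by
          simp [pvInnerUpd, pvModify_lose]
        have c1 : (((-1 : Int) :: cs).count 1 : Int) = (cs.count 1 : Int) := by
          simp [List.count_cons]
        have c2 : (((-1 : Int) :: cs).count (-1) : Int) = (cs.count (-1) : Int) + 1 := by
          simp [List.count_cons]
        have e1 : l + 1 + (cs.count (-1) : Int) = l + ((cs.count (-1) : Int) + 1) := by ring
        rw [hstep, ih, c1, c2, e1]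
      · have hstep : pvInnerUpd (PySem.Dict.mk [("win", w), ("lose", l)]) r
            = PySem.Dict.mk [("win", w), ("lose", l)] := by
          simp [pvInnerUpd, h1, h2]
        have c1 : ((r :: cs).count 1 : Int) = (cs.count 1 : Int) := by
          simp [List.count_cons, h1]
        have c2 : ((r :: cs).count (-1) : Int) = (cs.count (-1) : Int) := by
          simp [List.count_cons, h2]
        rw [hstep, ih, c1, c2]

theorem pvStepA_contains (d : PySem.Dict String (PySem.Dict String Int)) (p : Int × String) (k : String) :
    (pvStepA d p).contains k = (k == p.2 || d.contains k) := by
  unfold pvStepA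
  by_cases hc : d.contains p.2
  · simp [hc, PySem.Dict.contains_modify]
    split_ifs <;>
      simp [PySem.Dict.contains_modify] <;>
      · by_cases hk : k = p.2 <;> simp [hk, hc]
  · simp only [hc, if_false, Bool.false_eq_true]
    split_ifs <;> simp [PySem.Dict.contains_modify, PySem.Dict.contains_insert, Bool.or_assoc, Bool.or_self]

theorem pvStepA_getD (d : PySem.Dict String (PySem.Dict String Int)) (r : Int) (n k : String) :
    (pvStepA d (r, n)).getD k PySem.Dict.empty =
      if k = n then
        pvInnerUpd (if d.contains n then d.getD n PySem.Dict.empty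
                    else PySem.Dict.mk [("win", (0 : Int)), ("lose", (0 : Int))]) r
      else d.getD k PySem.Dict.empty := by
  unfold pvStepA pvInnerUpd
  by_cases hc : d.contains n <;> by_cases hk : k = n <;>
    split_ifs <;>
    simp_all [PySem.Dict.getD_modify, PySem.Dict.getD_insert, pvInner0_eq,
      PySem.Dict.getD_of_not_contains]

theorem pvFoldA_getD (mr : List (Int × String)) : ∀ (d : PySem.Dict String (PySem.Dict String Int)) (k : String),
    (mr.foldl pvStepA d).getD k PySem.Dict.empty =
      if d.contains k then
        ((mr.filter (fun p => p.2 == k)).map (·.1)).foldl pvInnerUpd (d.getD k PySem.Dict.empty)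
      else if k ∈ mr.map (·.2) then
        ((mr.filter (fun p => p.2 == k)).map (·.1)).foldl pvInnerUpd
          (PySem.Dict.mk [("win", (0 : Int)), ("lose", (0 : Int))])
      else PySem.Dict.empty := by
  induction mr with
  | nil =>
    intro d k
    by_cases hc : d.contains k <;> simp [hc, PySem.Dict.getD_of_not_contains]
  | cons p mr ih =>
    intro d k
    obtain ⟨r, n⟩ := p
    rw [List.foldl_cons, ih]
    by_cases hk : k = n
    · subst hk
      simp only [pvStepA_contains, beq_self_eq_true, Bool.true_or, if_true,
        pvStepA_getD, if_pos rfl, List.filter_cons, List.map_cons, beq_self_eq_true]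
      by_cases hc : d.contains k <;>
        simp [hc, List.mem_map, List.foldl_cons]
    · have hkb : (k == n) = false := by simp [hk]
      simp only [pvStepA_contains, hkb, Bool.false_or, pvStepA_getD, if_neg hk,
        List.filter_cons, List.map_cons]
      have : ((r, n).2 == k) = false := by simp [Ne.symm hk]
      simp only [this, Bool.false_eq_true, if_false, List.mem_cons, hk, false_or]

theorem pvStepA_keys (d : PySem.Dict String (PySem.Dict String Int)) (p : Int × String) :
    (pvStepA d p).keys = PySem.Set.add d.keys p.2 := by
  unfold pvStepA
  by_cases hc : d.contains p.2
  · have hmem : p.2 ∈ d.keys := (PySem.Dict.contains_iff_mem_keys d p.2).1 hc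
    have hadd : PySem.Set.add d.keys p.2 = d.keys := by
      simp [PySem.Set.add, PySem.Set.contains, hmem]
    simp only [hc, if_true]
    split_ifs <;>
      simp [PySem.Dict.keys_modify, PySem.Dict.keys_insert_of_contains _ _ hc, hadd]
  · rw [Bool.not_eq_true] at hc
    have hmem : p.2 ∉ d.keys := fun h =>
      by simp [(PySem.Dict.contains_iff_mem_keys d p.2).2 h] at hc
    have hadd : PySem.Set.add d.keys p.2 = d.keys ++ [p.2] := by
      simp [PySem.Set.add, PySem.Set.contains, hmem]
    have hc' : (d.insert p.2 (PySem.Dict.ofList [("win", (0 : Int)), ("lose", (0 : Int))])).contains p.2 = true := by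
      simp [PySem.Dict.contains_insert]
    simp only [hc, Bool.false_eq_true, if_false]
    split_ifs <;>
      simp [PySem.Dict.keys_modify, PySem.Dict.keys_insert_of_contains _ _ hc',
        PySem.Dict.keys_insert_of_not_contains _ _ hc, hadd]

theorem pvFoldA_keys (mr : List (Int × String)) : ∀ (d : PySem.Dict String (PySem.Dict String Int)),
    (mr.foldl pvStepA d).keys = PySem.Set.update d.keys (mr.map (·.2)) := by
  induction mr with
  | nil => intro d; simp [PySem.Set.update]
  | cons p mr ih =>
    intro d
    rw [List.foldl_cons, ih, List.map_cons, PySem.Set.update_cons, pvStepA_keys]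

theorem pvGroups_getD (mr : List (Int × String)) (k : String) :
    (mr.foldl (fun g p => g.modify p.2 [] (fun l => l ++ [p.1]))
        (PySem.Dict.empty : PySem.Dict String (List Int))).getD k []
      = (mr.filter (fun p => p.2 == k)).map (·.1) := by
  have h := PySem.Dict.getD_foldl_modify_append (mr.map (fun p => (p.2, p.1)))
    (PySem.Dict.empty : PySem.Dict String (List Int)) k
  rw [List.foldl_map] at h
  simpa [List.filter_map, Function.comp] using h

theorem pvGroups_keys (mr : List (Int × String)) :
    (mr.foldl (fun g p => g.modify p.2 [] (fun l => l ++ [p.1]))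
        (PySem.Dict.empty : PySem.Dict String (List Int))).keys
      = PySem.Set.ofList (mr.map (·.2)) := by
  have h := PySem.Dict.keys_foldl_modify_key mr (fun p => p.2) ([] : List Int)
    (fun _ p l => l ++ [p.1]) PySem.Dict.empty
  simpa [PySem.Set.update_nil_left, PySem.Dict.keys_empty] using h

-- ===== VERDICT (by name: the statement is the Claim_ definition above) =====
theorem find_map_data_spec : Claim_equal_find_map_data := by
  intro mr _
  show find_map_data mr = find_map_data_alt mr
  unfold find_map_data find_map_data_alt
  set dA := mr.foldl pvStepA PySem.Dict.empty with hdA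
  set g := mr.foldl (fun g p => g.modify p.2 [] (fun l => l ++ [p.1]))
    (PySem.Dict.empty : PySem.Dict String (List Int)) with hg
  have hkA : dA.keys = PySem.Set.ofList (mr.map (·.2)) := by
    rw [hdA, pvFoldA_keys]; simp [PySem.Set.update_nil_left]
  have hkB : g.keys = PySem.Set.ofList (mr.map (·.2)) := pvGroups_keys mr
  have hndA : dA.keys.Nodup := by rw [hkA]; exact PySem.Set.nodup_ofList _
  have hndB : g.keys.Nodup := by rw [hkB]; exact PySem.Set.nodup_ofList _
  rw [PySem.Dict.items_eq_map_keys dA hndA PySem.Dict.empty,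
      PySem.Dict.items_eq_map_keys g hndB [], hkA, hkB]
  simp only [List.map_map]
  apply List.map_congr_left
  intro k hk
  have hmem : k ∈ mr.map (·.2) := (PySem.Set.mem_ofList _ _).1 hk
  have hA : dA.getD k PySem.Dict.empty
      = ((mr.filter (fun p => p.2 == k)).map (·.1)).foldl pvInnerUpd
          (PySem.Dict.mk [("win", (0 : Int)), ("lose", (0 : Int))]) := by
    rw [hdA, pvFoldA_getD]
    simp [hmem, PySem.Dict.contains_empty]
  have hB : g.getD k [] = (mr.filter (fun p => p.2 == k)).map (·.1) := pvGroups_getD mr k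
  simp only [Function.comp]
  rw [hA, hB, pvInner_foldl]
  simp
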